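-- pv_equiv track=rewrite | github.com/mariadaan/AdventOfCode2021 | Day_10/day10.py | remove_sets
-- ===== SOURCE A (Python) =====
-- def set_in_str(string, sets):
-- 	for item in sets:
-- 		if item in string:
-- 			return 1
-- 	return 0
--
-- def remove_sets(chunks):
-- 	stripped = []
-- 	sets = ["{}", "[]", "()", "<>"]
-- 	for index, row in enumerate(chunks):
-- 		while set_in_str(row, sets):
-- 			row = row.replace("{}", "")
-- 			row = row.replace("()", "")
-- 			row = row.replace("<>", "")
-- 			row = row.replace("[]", "")
-- 		stripped.append(row)
-- 	return stripped
-- ===== SOURCE B (Python) =====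
-- def remove_sets(chunks):
--     pairs = {')': '(', ']': '[', '}': '{', '>': '<'}
--     out = []
--     for row in chunks:
--         stack = []
--         for ch in row:
--             if ch in pairs and stack and stack[-1] == pairs[ch]:
--                 stack.pop()
--             else:
--                 stack.append(ch)
--         out.append(''.join(stack))
--     return out
-- ===== Notes on version B (the rewrite author's own statement) =====
-- stated objective: alternative
-- what changed: Replaces A's repeat-str.replace-until-no-pair-remains loop (rescanning the whole row each round) with a single stack pass per row that cancels each closer against the matching opener on top of the stack.
import Mathlib
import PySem

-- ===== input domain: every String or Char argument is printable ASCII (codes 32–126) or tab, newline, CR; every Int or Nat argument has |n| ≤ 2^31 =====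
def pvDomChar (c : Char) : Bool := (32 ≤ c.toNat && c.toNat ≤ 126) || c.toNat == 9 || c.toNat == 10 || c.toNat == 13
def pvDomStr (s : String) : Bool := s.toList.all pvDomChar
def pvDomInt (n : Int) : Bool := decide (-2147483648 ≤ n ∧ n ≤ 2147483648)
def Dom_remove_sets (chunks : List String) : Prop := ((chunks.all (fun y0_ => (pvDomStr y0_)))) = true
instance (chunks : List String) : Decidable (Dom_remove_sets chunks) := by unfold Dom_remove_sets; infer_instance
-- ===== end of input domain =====

-- B replaces A's repeat-replace-until-no-pair-remains loop by a single stack pass per row (same values, different algorithm).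

-- ===== PORT A =====
-- set_in_str(string, sets): first match returns 1, else 0
def set_in_str (string : String) (sets : List String) : Int :=
  match sets with
  | [] => 0
  | item :: rest => if PySem.Str.isIn item string then 1 else set_in_str string rest

-- termination helpers for A's while loop (each replace of a two-char pattern by "" never
-- lengthens the string, and strictly shortens it when the pattern occurs)
theorem replaceGo_len_le (old : List Char) :
    ∀ (fuel : Nat) (l acc : List Char),
      (PySem.Chars.replace.go old [] fuel l acc).length ≤ acc.length + l.length := by
  intro fuel
  induction fuel with
  | zero => intro l acc; simp [PySem.Chars.replace.go]
  | succ n ih =>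
      intro l acc
      cases l with
      | nil => simp [PySem.Chars.replace.go]
      | cons c t =>
          simp only [PySem.Chars.replace.go]
          split
          · rename_i hpre
            have hle : old.length ≤ (c :: t).length := (List.isPrefixOf_iff_prefix.mp hpre).length_le
            have := ih ((c :: t).drop old.length) acc
            simp at this ⊢
            have hdl : ((c :: t).drop old.length).length = (c :: t).length - old.length :=
              List.length_drop ..
            simp at hdl
            omega
          · have := ih t (c :: acc)
            simp at this ⊢
            omega

theorem replaceGo_len_lt (old : List Char) (hold : old ≠ []) :
    ∀ (fuel : Nat) (l acc : List Char), l.length ≤ fuel → old <:+: l →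
      (PySem.Chars.replace.go old [] fuel l acc).length < acc.length + l.length := by
  intro fuel
  induction fuel with
  | zero =>
      intro l acc hf hin
      interval_cases hl : l.length
      · have : l = [] := List.eq_nil_of_length_eq_zero hl
        subst this
        have : old = [] := List.eq_nil_of_infix_nil hin
        exact absurd this hold
  | succ n ih =>
      intro l acc hf hin
      cases l with
      | nil =>
          have : old = [] := List.eq_nil_of_infix_nil hin
          exact absurd this hold
      | cons c t =>
          simp only [PySem.Chars.replace.go]
          split
          · rename_i hpre
            have hle : old.length ≤ (c :: t).length := (List.isPrefixOf_iff_prefix.mp hpre).length_le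
            have := replaceGo_len_le old n ((c :: t).drop old.length) acc
            have hdl : ((c :: t).drop old.length).length = (c :: t).length - old.length :=
              List.length_drop ..
            have holdpos : 0 < old.length := List.length_pos_of_ne_nil hold
            simp at this hdl ⊢
            omega
          · rename_i hpre
            -- old is an infix of c :: t but not a prefix, hence an infix of t
            have hin' : old <:+: t := by
              rcases hin with ⟨u, v, huv⟩
              cases u with
              | nil =>
                  exfalso
                  apply hpre
                  apply List.isPrefixOf_iff_prefix.mpr
                  exact ⟨v, by simpa using huv⟩
              | cons a u' =>
                  simp at huv
                  exact ⟨u', v, by simpa [List.append_assoc] using huv.2⟩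
            have := ih t (c :: acc) (by simp at hf ⊢; omega) hin'
            simp at this ⊢
            omega

theorem replace_len_le (cs old : List Char) (hold : old ≠ []) :
    (PySem.Chars.replace cs old []).length ≤ cs.length := by
  have := replaceGo_len_le old cs.length cs []
  simpa [PySem.Chars.replace, List.isEmpty_iff, hold] using this

theorem replace_len_lt (cs old : List Char) (hold : old ≠ []) (hin : old <:+: cs) :
    (PySem.Chars.replace cs old []).length < cs.length := by
  have := replaceGo_len_lt old hold cs.length cs [] le_rfl hin
  simpa [PySem.Chars.replace, List.isEmpty_iff, hold] using this

-- if the pattern does not occur, replace is the identity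
theorem replace_of_not_infix (cs old new : List Char) (hold : old ≠ []) (hin : ¬ old <:+: cs) :
    PySem.Chars.replace cs old new = cs := by
  have hgo : ∀ (fuel : Nat) (l acc : List Char), ¬ old <:+: l →
      PySem.Chars.replace.go old new fuel l acc = acc.reverse ++ l := by
    intro fuel
    induction fuel with
    | zero => intro l acc _; simp [PySem.Chars.replace.go]
    | succ n ih =>
        intro l acc hl
        cases l with
        | nil => simp [PySem.Chars.replace.go]
        | cons c t =>
            simp only [PySem.Chars.replace.go]
            split
            · rename_i hpre
              exact absurd (List.isPrefixOf_iff_prefix.mp hpre).isInfix hl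
            · have hlt : ¬ old <:+: t := fun h => hl (h.trans (List.suffix_cons c t).isInfix)
              rw [ih t (c :: acc) hlt]
              simp
  have := hgo cs.length cs [] hin
  simpa [PySem.Chars.replace, List.isEmpty_iff, hold] using this

-- the while-loop body strictly shrinks the row while some pair occurs (termination of A's loop)
theorem strip4_lt (l0 : List Char)
    (h : ['{','}'] <:+: l0 ∨ ['[',']'] <:+: l0 ∨ ['(',')'] <:+: l0 ∨ ['<','>'] <:+: l0) :
    (PySem.Chars.replace (PySem.Chars.replace (PySem.Chars.replace
      (PySem.Chars.replace l0 ['{','}'] []) ['(',')'] []) ['<','>'] []) ['[',']'] []).length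
      < l0.length := by
  set l1 := PySem.Chars.replace l0 ['{','}'] [] with hl1
  set l2 := PySem.Chars.replace l1 ['(',')'] [] with hl2
  set l3 := PySem.Chars.replace l2 ['<','>'] [] with hl3
  have le4 : (PySem.Chars.replace l3 ['[',']'] []).length ≤ l3.length :=
    replace_len_le _ _ (by simp)
  have le3 : l3.length ≤ l2.length := replace_len_le _ _ (by simp)
  have le2 : l2.length ≤ l1.length := replace_len_le _ _ (by simp)
  have le1 : l1.length ≤ l0.length := replace_len_le _ _ (by simp)
  by_cases h1 : ['{','}'] <:+: l0
  · have := replace_len_lt l0 ['{','}'] (by simp) h1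
    rw [← hl1] at this
    omega
  · have e1 : l1 = l0 := by rw [hl1, replace_of_not_infix _ _ _ (by simp) h1]
    rw [e1] at le2 hl2
    by_cases h2 : ['(',')'] <:+: l0
    · have := replace_len_lt l0 ['(',')'] (by simp) h2
      rw [← hl2] at this
      omega
    · have e2 : l2 = l0 := by rw [hl2, replace_of_not_infix _ _ _ (by simp) h2]
      rw [e2] at le3 hl3
      by_cases h3 : ['<','>'] <:+: l0
      · have := replace_len_lt l0 ['<','>'] (by simp) h3
        rw [← hl3] at this
        omega
      · have e3 : l3 = l0 := by rw [hl3, replace_of_not_infix _ _ _ (by simp) h3]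
        rw [e3] at le4
        by_cases h4 : ['[',']'] <:+: l0
        · have := replace_len_lt l0 ['[',']'] (by simp) h4
          rw [← e3] at this
          omega
        · rcases h with h | h | h | h
          · exact absurd h h1
          · exact absurd h h4
          · exact absurd h h2
          · exact absurd h h3

-- a nonzero set_in_str means one of the search strings occurs
theorem set_in_str_ne_zero (row : String)
    (h : set_in_str row ["{}", "[]", "()", "<>"] ≠ 0) :
    ['{','}'] <:+: row.toList ∨ ['[',']'] <:+: row.toList ∨
      ['(',')'] <:+: row.toList ∨ ['<','>'] <:+: row.toList := by
  simp only [set_in_str] at h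
  split_ifs at h with h1 h2 h3 h4
  · exact Or.inl (by have := (PySem.Str.isIn_iff_infix _ _).mp h1; simpa using this)
  · exact Or.inr (Or.inl (by have := (PySem.Str.isIn_iff_infix _ _).mp h2; simpa using this))
  · exact Or.inr (Or.inr (Or.inl (by have := (PySem.Str.isIn_iff_infix _ _).mp h3; simpa using this)))
  · exact Or.inr (Or.inr (Or.inr (by have := (PySem.Str.isIn_iff_infix _ _).mp h4; simpa using this)))
  · exact absurd rfl h

-- A's while loop, recursing on the shrinking row
def stripRowA (row : String) : String :=
  if h : set_in_str row ["{}", "[]", "()", "<>"] ≠ 0 then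
    stripRowA (PySem.Str.replace (PySem.Str.replace (PySem.Str.replace (PySem.Str.replace row "{}" "") "()" "") "<>" "") "[]" "")
  else
    row
termination_by row.toList.length
decreasing_by
  simp only [PySem.Str.toList_replace,
    show ("{}" : String).toList = ['{','}'] from rfl,
    show ("()" : String).toList = ['(',')'] from rfl,
    show ("<>" : String).toList = ['<','>'] from rfl,
    show ("[]" : String).toList = ['[',']'] from rfl,
    show ("" : String).toList = [] from rfl]
  exact strip4_lt row.toList (set_in_str_ne_zero row h)

def remove_sets (chunks : List String) : List String :=
  (PySem.List.enumerate chunks).foldl (fun stripped p => stripped ++ [stripRowA p.2]) []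

-- ===== PORT B =====
-- pairs[ch] = matching opener for closer ch; pairB top ch ↔ (ch in pairs and top == pairs[ch])
def pairB (top ch : Char) : Bool :=
  (top = '(' && ch = ')') || (top = '[' && ch = ']') || (top = '{' && ch = '}') || (top = '<' && ch = '>')

-- one step of B's stack loop (stack kept top-first; append = cons, stack[-1] = head, pop = tail)
def stepB (st : List Char) (ch : Char) : List Char :=
  match st with
  | top :: rest => if pairB top ch then rest else ch :: st
  | [] => [ch]

-- ''.join(stack) with the stack stored top-first
def normRowB (row : String) : String :=
  String.ofList ((row.toList.foldl stepB []).reverse)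

def remove_sets_alt (chunks : List String) : List String :=
  chunks.foldl (fun out row => out ++ [normRowB row]) []

-- ===== PRECONDITION & SPEC =====
def Spec_remove_sets (chunks : List String) (out : List String) : Prop := out = remove_sets_alt chunks
instance (chunks : List String) (out : List String) : Decidable (Spec_remove_sets chunks out) := by unfold Spec_remove_sets; infer_instance

-- ===== CLAIM (what is proved, stated in full; the proofs are below) =====
def Claim_equal_remove_sets : Prop := ∀ (chunks : List String), Dom_remove_sets chunks → Spec_remove_sets chunks (remove_sets chunks)

-- ===== LEMMAS AND PROOFS =====

-- an opener is always pushed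
theorem stepB_push (o : Char) (hop : ∀ x, pairB x o = false) (st : List Char) :
    stepB st o = o :: st := by
  cases st with
  | nil => rfl
  | cons top rest => simp [stepB, hop top]

-- the stack fold is invariant under deleting one occurrence-wise replace of a matched pair
theorem foldl_stepB_replace (o c : Char) (hoc : pairB o c = true) (hop : ∀ x, pairB x o = false)
    (cs : List Char) (st : List Char) :
    (PySem.Chars.replace cs [o, c] []).foldl stepB st = cs.foldl stepB st := by
  have hgo : ∀ (fuel : Nat) (l acc st : List Char),
      (PySem.Chars.replace.go [o, c] [] fuel l acc).foldl stepB st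
        = l.foldl stepB (acc.reverse.foldl stepB st) := by
    intro fuel
    induction fuel with
    | zero => intro l acc st; simp [PySem.Chars.replace.go, List.foldl_append]
    | succ n ih =>
        intro l acc st
        cases l with
        | nil => simp [PySem.Chars.replace.go]
        | cons c' t =>
            simp only [PySem.Chars.replace.go]
            split
            · rename_i hpre
              rcases List.isPrefixOf_iff_prefix.mp hpre with ⟨v, hv⟩
              simp only [List.cons_append, List.nil_append, List.cons.injEq] at hv
              obtain ⟨rfl, hv2⟩ := hv
              obtain rfl : t = c :: v := hv2.symm
              simp only [List.length_cons, List.length_nil, List.drop_succ_cons,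
                List.drop_zero, List.reverse_nil, List.nil_append]
              rw [ih v acc st]
              rw [List.foldl_cons, List.foldl_cons]
              rw [stepB_push o hop, show stepB (o :: acc.reverse.foldl stepB st) c
                    = acc.reverse.foldl stepB st by simp [stepB, hoc]]
            · rw [ih t (c' :: acc) st]
              simp [List.foldl_append]
  have h2 : PySem.Chars.replace cs [o, c] [] = PySem.Chars.replace.go [o, c] [] cs.length cs [] := by
    simp [PySem.Chars.replace]
  rw [h2, hgo cs.length cs [] st]
  simp

-- on a string with no adjacent matched pair the stack fold is a no-op
theorem foldl_stepB_fixpoint (cs : List Char) :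
    ∀ st, (∀ u o c v, st.reverse ++ cs = u ++ o :: c :: v → pairB o c = false) →
      cs.foldl stepB st = cs.reverse ++ st := by
  induction cs with
  | nil => intro st _; simp
  | cons c t ih =>
      intro st h
      have hstep : stepB st c = c :: st := by
        cases st with
        | nil => rfl
        | cons top rest =>
            have : pairB top c = false := by
              apply h rest.reverse top c t
              simp
            simp [stepB, this]
      rw [List.foldl_cons, hstep, ih (c :: st) (by intro u o c' v huv; apply h u o c' v; simpa using huv)]
      simp

-- a zero set_in_str means none of the search strings occurs
theorem set_in_str_eq_zero (s : String) (l : List String) (h : set_in_str s l = 0) :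
    ∀ p ∈ l, PySem.Str.isIn p s = false := by
  induction l with
  | nil => simp
  | cons x rest ih =>
      intro p hp
      simp only [set_in_str] at h
      split at h
      · exact absurd h one_ne_zero
      · rename_i hc
        rcases List.mem_cons.mp hp with rfl | hp'
        · cases hb : PySem.Str.isIn p s with
          | false => rfl
          | true => exact absurd hb hc
        · exact ih h p hp'

-- A's fully-stripped row equals B's stack normal form
set_option maxHeartbeats 1000000 in
theorem stripRowA_eq_normRowB (row : String) : stripRowA row = normRowB row := by
  induction row using stripRowA.induct with
  | case1 row h ih =>
      rw [stripRowA, dif_pos h, ih]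
      have hfold : (PySem.Str.replace (PySem.Str.replace (PySem.Str.replace
            (PySem.Str.replace row "{}" "") "()" "") "<>" "") "[]" "").toList.foldl stepB []
          = row.toList.foldl stepB [] := by
        simp only [PySem.Str.toList_replace,
          show ("{}" : String).toList = ['{','}'] from rfl,
          show ("()" : String).toList = ['(',')'] from rfl,
          show ("<>" : String).toList = ['<','>'] from rfl,
          show ("[]" : String).toList = ['[',']'] from rfl,
          show ("" : String).toList = [] from rfl]
        rw [foldl_stepB_replace '[' ']' (by decide) (fun x => by simp [pairB]),
            foldl_stepB_replace '<' '>' (by decide) (fun x => by simp [pairB]),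
            foldl_stepB_replace '(' ')' (by decide) (fun x => by simp [pairB]),
            foldl_stepB_replace '{' '}' (by decide) (fun x => by simp [pairB])]
      unfold normRowB
      rw [hfold]
  | case2 row h =>
      rw [stripRowA, dif_neg h]
      have h0 : set_in_str row ["{}", "[]", "()", "<>"] = 0 := not_ne_iff.mp h
      have hforall : ∀ u o c v, row.toList = u ++ o :: c :: v → pairB o c = false := by
        intro u o c v huv
        by_contra hp
        have hp' : pairB o c = true := by simpa using hp
        have hcases : (o = '(' ∧ c = ')') ∨ (o = '[' ∧ c = ']') ∨
            (o = '{' ∧ c = '}') ∨ (o = '<' ∧ c = '>') := by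
          have := hp'
          simp [pairB] at this
          tauto
        have hinf : [o, c] <:+: row.toList := ⟨u, v, by rw [huv]; simp⟩
        have hisin := set_in_str_eq_zero row _ h0
        rcases hcases with ⟨rfl, rfl⟩ | ⟨rfl, rfl⟩ | ⟨rfl, rfl⟩ | ⟨rfl, rfl⟩
        · have := hisin "()" (by simp)
          rw [Bool.eq_false_iff] at this
          exact this ((PySem.Str.isIn_iff_infix _ _).mpr (by simpa using hinf))
        · have := hisin "[]" (by simp)
          rw [Bool.eq_false_iff] at this
          exact this ((PySem.Str.isIn_iff_infix _ _).mpr (by simpa using hinf))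
        · have := hisin "{}" (by simp)
          rw [Bool.eq_false_iff] at this
          exact this ((PySem.Str.isIn_iff_infix _ _).mpr (by simpa using hinf))
        · have := hisin "<>" (by simp)
          rw [Bool.eq_false_iff] at this
          exact this ((PySem.Str.isIn_iff_infix _ _).mpr (by simpa using hinf))
      have hfix := foldl_stepB_fixpoint row.toList []
        (by intro u o c v huv; exact hforall u o c v (by simpa using huv))
      unfold normRowB
      rw [hfix]
      simp

-- ===== VERDICT (by name: the statement is the Claim_ definition above) =====
theorem remove_sets_spec : Claim_equal_remove_sets := by
  intro chunks _
  unfold Spec_remove_sets remove_sets remove_sets_alt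
  rw [PySem.List.foldl_append_singleton_eq_map, PySem.List.foldl_append_singleton_eq_map]
  simp only [List.nil_append]
  have : (PySem.List.enumerate chunks).map (fun p => stripRowA p.2)
      = ((PySem.List.enumerate chunks).map (·.2)).map stripRowA := by
    rw [List.map_map]; rfl
  rw [this, PySem.List.map_snd_enumerate]
  exact List.map_congr_left (fun row _ => stripRowA_eq_normRowB row)
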